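-- pv_equiv track=rewrite | github.com/peterbarker/ardupilot | Tools/debug/crash_dump_report.py | parse_gdb_symbols
-- ===== SOURCE A (Python) =====
-- def parse_gdb_symbols(section):
--     """Parse symbol resolution results from GDB output.
--
--     Returns a dict mapping register names to dicts with keys:
--         'symbol': e.g. "AP_InertialSensor::update() + 124"
--         'line':   e.g. "Line 456 of \"AP_InertialSensor.cpp\" ..."  (PC/LR only)
--     """
--     if section is None:
--         return {}
--     results = {}
--     current_key = None
--     current_field = None  # 'symbol' or 'line'
--     for line in section.splitlines():
--         line = line.strip()
--         if line.endswith('_SYM='):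
--             reg_name = line[:-5]
--             current_key = reg_name
--             current_field = 'symbol'
--             results.setdefault(reg_name, {})
--         elif line.endswith('_LINE='):
--             reg_name = line[:-6]
--             current_key = reg_name
--             current_field = 'line'
--             results.setdefault(reg_name, {})
--         elif current_key and current_field:
--             # GDB outputs "No symbol matches ..." for unknown addresses
--             if 'No symbol' in line or 'No line' in line:
--                 current_field = None
--                 continue
--             results[current_key][current_field] = line
--             current_field = None
--     return results
-- ===== SOURCE B (Python) =====
-- def parse_gdb_symbols(section):
--     """Stateless lookahead: materialise stripped lines, handle each marker by peeking at the next line."""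
--     if section is None:
--         return {}
--
--     def marker(line):
--         if line.endswith('_SYM='):
--             return line[:-5], 'symbol'
--         if line.endswith('_LINE='):
--             return line[:-6], 'line'
--         return None
--
--     lines = [l.strip() for l in section.splitlines()]
--     results = {}
--     for i, line in enumerate(lines):
--         m = marker(line)
--         if m is None:
--             continue
--         reg_name, field = m
--         results.setdefault(reg_name, {})
--         if reg_name and i + 1 < len(lines):
--             nxt = lines[i + 1]
--             if marker(nxt) is None and 'No symbol' not in nxt and 'No line' not in nxt:
--                 results[reg_name][field] = nxt
--     return results
-- ===== Notes on version B (the rewrite author's own statement) =====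
-- stated objective: alternative
-- what changed: Replaced A's cross-iteration state machine (current_key/current_field carried between lines) with a stateless single pass over a materialised list of stripped lines that handles each marker line by peeking at the next line.
import Mathlib
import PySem

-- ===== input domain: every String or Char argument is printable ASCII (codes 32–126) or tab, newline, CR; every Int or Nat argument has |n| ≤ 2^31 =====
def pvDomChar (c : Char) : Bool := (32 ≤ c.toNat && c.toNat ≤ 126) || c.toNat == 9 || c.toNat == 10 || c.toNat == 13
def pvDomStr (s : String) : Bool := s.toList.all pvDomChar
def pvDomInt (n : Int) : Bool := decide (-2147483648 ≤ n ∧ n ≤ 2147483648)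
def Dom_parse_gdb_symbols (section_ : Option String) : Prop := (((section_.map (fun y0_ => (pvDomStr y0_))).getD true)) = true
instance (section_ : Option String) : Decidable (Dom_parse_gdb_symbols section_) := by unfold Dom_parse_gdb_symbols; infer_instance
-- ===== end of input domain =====

-- B is an alternative decomposition: a stateless pass with lookahead instead of A's cross-iteration state machine.

-- ===== PORT A =====
-- Python truthiness of an Optional[str]: None and "" are falsy.
def pvTruthyOptStr (o : Option String) : Bool :=
  match o with
  | none => false
  | some s => s ≠ ""

-- one iteration of A's for-loop; state = (results, current_key, current_field)
def pvAStep (st : PySem.Dict String (PySem.Dict String String) × Option String × Option String)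
    (rawLine : String) :
    PySem.Dict String (PySem.Dict String String) × Option String × Option String :=
  let results := st.1
  let line := PySem.Str.strip rawLine
  if PySem.Str.endswith line "_SYM=" then
    let reg_name := PySem.Str.slice line none (some (-5))
    (results.setdefault reg_name PySem.Dict.empty, some reg_name, some "symbol")
  else if PySem.Str.endswith line "_LINE=" then
    let reg_name := PySem.Str.slice line none (some (-6))
    (results.setdefault reg_name PySem.Dict.empty, some reg_name, some "line")
  else if pvTruthyOptStr st.2.1 && pvTruthyOptStr st.2.2 then
    if PySem.Str.isIn "No symbol" line || PySem.Str.isIn "No line" line then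
      (results, st.2.1, none)
    else
      (results.modify (st.2.1.getD "") PySem.Dict.empty
        (fun inner => inner.insert (st.2.2.getD "") line), st.2.1, none)
  else st

def parse_gdb_symbols (section_ : Option String) : List (String × List (String × String)) :=
  match section_ with
  | none => []
  | some sec =>
    let fin := (PySem.Str.splitlines sec).foldl pvAStep (PySem.Dict.empty, none, none)
    fin.1.items.map (fun p => (p.1, p.2.items))

-- ===== PORT B =====
-- B's marker helper: some (reg_name, field) iff the line ends with '_SYM=' / '_LINE='.
def pvMarker (line : String) : Option (String × String) :=
  if PySem.Str.endswith line "_SYM=" then some (PySem.Str.slice line none (some (-5)), "symbol")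
  else if PySem.Str.endswith line "_LINE=" then some (PySem.Str.slice line none (some (-6)), "line")
  else none

def pvNoHit (line : String) : Bool :=
  PySem.Str.isIn "No symbol" line || PySem.Str.isIn "No line" line

-- B's indexed loop with lookahead, as structural recursion peeking at the head of the rest
def pvBGo (d : PySem.Dict String (PySem.Dict String String)) :
    List String → PySem.Dict String (PySem.Dict String String)
  | [] => d
  | l :: rest =>
    match pvMarker l with
    | none => pvBGo d rest
    | some (reg_name, field) =>
      let d1 := d.setdefault reg_name PySem.Dict.empty
      let d2 :=
        if reg_name ≠ "" then
          match rest with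
          | [] => d1
          | nxt :: _ =>
            if pvMarker nxt = none && !(pvNoHit nxt) then
              d1.modify reg_name PySem.Dict.empty (fun inner => inner.insert field nxt)
            else d1
        else d1
      pvBGo d2 rest

def parse_gdb_symbols_alt (section_ : Option String) : List (String × List (String × String)) :=
  match section_ with
  | none => []
  | some sec =>
    let lines := (PySem.Str.splitlines sec).map PySem.Str.strip
    (pvBGo PySem.Dict.empty lines).items.map (fun p => (p.1, p.2.items))

-- ===== PRECONDITION & SPEC =====
def Spec_parse_gdb_symbols (section_ : Option String) (out : List (String × List (String × String))) : Prop := out = parse_gdb_symbols_alt section_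
instance (section_ : Option String) (out : List (String × List (String × String))) : Decidable (Spec_parse_gdb_symbols section_ out) := by unfold Spec_parse_gdb_symbols; infer_instance

-- ===== CLAIM (what is proved, stated in full; the proofs are below) =====
def Claim_equal_parse_gdb_symbols : Prop := ∀ (section_ : Option String), Dom_parse_gdb_symbols section_ → Spec_parse_gdb_symbols section_ (parse_gdb_symbols section_)

-- ===== LEMMAS AND PROOFS =====

-- one-step unfolding of B's loop on a non-marker head line
theorem pvBGo_cons_none {l : String} (hm : pvMarker l = none)
    (d : PySem.Dict String (PySem.Dict String String)) (rest : List String) :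
    pvBGo d (l :: rest) = pvBGo d rest := by
  conv_lhs => rw [pvBGo.eq_def]
  dsimp only
  rw [hm]

-- one-step unfolding of B's loop on a marker head line
theorem pvBGo_cons_marker {l reg fld : String} (hm : pvMarker l = some (reg, fld))
    (d : PySem.Dict String (PySem.Dict String String)) (rest : List String) :
    pvBGo d (l :: rest) =
      pvBGo (if reg ≠ "" then
          match rest with
          | [] => d.setdefault reg PySem.Dict.empty
          | nxt :: _ =>
            if pvMarker nxt = none && !(pvNoHit nxt) then
              (d.setdefault reg PySem.Dict.empty).modify reg PySem.Dict.empty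
                (fun inner => inner.insert fld nxt)
            else d.setdefault reg PySem.Dict.empty
        else d.setdefault reg PySem.Dict.empty) rest := by
  conv_lhs => rw [pvBGo.eq_def]
  dsimp only
  rw [hm]

-- Shared marker case of the induction step: after A sees a marker line (new state armed with
-- reg/fld), its remaining fold agrees with B's loop on the whole cons list.
theorem pvMarkerCase (L : List String)
    (ih : ∀ (d : PySem.Dict String (PySem.Dict String String)) (key field : Option String),
      (¬ (pvTruthyOptStr key && pvTruthyOptStr field) = true →
        (L.foldl pvAStep (d, key, field)).1 = pvBGo d (L.map PySem.Str.strip)) ∧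
      (∀ r f, key = some r → field = some f → r ≠ "" → f ≠ "" →
        (L.foldl pvAStep (d, key, field)).1 =
          (match L.map PySem.Str.strip with
           | [] => d
           | nxt :: rest =>
             if pvMarker nxt = none && !(pvNoHit nxt) then
               pvBGo (d.modify r PySem.Dict.empty (fun inner => inner.insert f nxt)) (nxt :: rest)
             else pvBGo d (nxt :: rest))))
    (d : PySem.Dict String (PySem.Dict String String)) (line reg fld : String)
    (hm : pvMarker line = some (reg, fld)) (hfld : fld ≠ "") :
    (L.foldl pvAStep
        (PySem.Dict.setdefault d reg PySem.Dict.empty, some reg, some fld)).1 =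
      pvBGo d (line :: L.map PySem.Str.strip) := by
  rw [pvBGo_cons_marker hm]
  by_cases hreg : reg = ""
  · subst hreg
    simp only [ne_eq, not_true_eq_false, if_false]
    exact (ih (PySem.Dict.setdefault d "" PySem.Dict.empty) (some "") (some fld)).1
      (by simp [pvTruthyOptStr])
  · rw [(ih (PySem.Dict.setdefault d reg PySem.Dict.empty) (some reg) (some fld)).2
      reg fld rfl rfl hreg hfld]
    simp only [ne_eq, hreg, not_false_eq_true, if_true]
    cases hL : L.map PySem.Str.strip with
    | nil => rfl
    | cons nxt rest =>
      dsimp only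
      by_cases hc : (pvMarker nxt = none && !(pvNoHit nxt)) = true
      · rw [if_pos hc, if_pos hc]
      · rw [if_neg hc, if_neg hc]

-- The core invariant: A's fold from any DISARMED state (current_key falsy or current_field None)
-- agrees with B's lookahead loop; from an ARMED state (truthy key, field set) it agrees with
-- B's loop after B's pending lookahead-assignment is accounted for.
theorem pvA_eq_pvB (L : List String)
    (d : PySem.Dict String (PySem.Dict String String)) (key field : Option String) :
    (¬ (pvTruthyOptStr key && pvTruthyOptStr field) = true →
      (L.foldl pvAStep (d, key, field)).1 = pvBGo d (L.map PySem.Str.strip)) ∧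
    (∀ r f, key = some r → field = some f → r ≠ "" → f ≠ "" →
      (L.foldl pvAStep (d, key, field)).1 =
        (match L.map PySem.Str.strip with
         | [] => d
         | nxt :: rest =>
           if pvMarker nxt = none && !(pvNoHit nxt) then
             pvBGo (d.modify r PySem.Dict.empty (fun inner => inner.insert f nxt)) (nxt :: rest)
           else pvBGo d (nxt :: rest))) := by
  induction L generalizing d key field with
  | nil => exact ⟨fun _ => rfl, fun r f _ _ _ _ => rfl⟩
  | cons l L ih =>
    simp only [List.foldl_cons, List.map_cons]
    by_cases h1 : PySem.Str.endswith (PySem.Str.strip l) "_SYM=" = true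
    · -- '_SYM=' marker line
      have hstep : pvAStep (d, key, field) l =
          (PySem.Dict.setdefault d (PySem.Str.slice (PySem.Str.strip l) none (some (-5)))
              PySem.Dict.empty,
            some (PySem.Str.slice (PySem.Str.strip l) none (some (-5))), some "symbol") := by
        simp only [pvAStep]; rw [if_pos h1]
      have hm : pvMarker (PySem.Str.strip l) =
          some (PySem.Str.slice (PySem.Str.strip l) none (some (-5)), "symbol") := by
        simp only [pvMarker]; rw [if_pos h1]
      rw [hstep]
      have main := pvMarkerCase L ih d (PySem.Str.strip l)
        (PySem.Str.slice (PySem.Str.strip l) none (some (-5))) "symbol" hm (by decide)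
      exact ⟨fun _ => main, fun r f _ _ _ _ => by simp [hm, main]⟩
    · by_cases h2 : PySem.Str.endswith (PySem.Str.strip l) "_LINE=" = true
      · -- '_LINE=' marker line
        have hstep : pvAStep (d, key, field) l =
            (PySem.Dict.setdefault d (PySem.Str.slice (PySem.Str.strip l) none (some (-6)))
                PySem.Dict.empty,
              some (PySem.Str.slice (PySem.Str.strip l) none (some (-6))), some "line") := by
          simp only [pvAStep]; rw [if_neg h1, if_pos h2]
        have hm : pvMarker (PySem.Str.strip l) =
            some (PySem.Str.slice (PySem.Str.strip l) none (some (-6)), "line") := by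
          simp only [pvMarker]; rw [if_neg h1, if_pos h2]
        rw [hstep]
        have main := pvMarkerCase L ih d (PySem.Str.strip l)
          (PySem.Str.slice (PySem.Str.strip l) none (some (-6))) "line" hm (by decide)
        exact ⟨fun _ => main, fun r f _ _ _ _ => by simp [hm, main]⟩
      · -- not a marker line
        have hm0 : pvMarker (PySem.Str.strip l) = none := by
          simp only [pvMarker]; rw [if_neg h1, if_neg h2]
        constructor
        · intro hd
          have hstep : pvAStep (d, key, field) l = (d, key, field) := by
            simp only [pvAStep]; rw [if_neg h1, if_neg h2, if_neg hd]
          rw [hstep, (ih d key field).1 hd, pvBGo_cons_none hm0]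
        · rintro r f rfl rfl hr hf
          have htr : (pvTruthyOptStr (some r) && pvTruthyOptStr (some f)) = true := by
            simp [pvTruthyOptStr, hr, hf]
          by_cases hn : (PySem.Str.isIn "No symbol" (PySem.Str.strip l) ||
              PySem.Str.isIn "No line" (PySem.Str.strip l)) = true
          · have hstep : pvAStep (d, some r, some f) l = (d, some r, none) := by
              simp only [pvAStep]; rw [if_neg h1, if_neg h2, if_pos htr, if_pos hn]
            rw [hstep, (ih d (some r) none).1 (by simp [pvTruthyOptStr])]
            have hnh : pvNoHit (PySem.Str.strip l) = true := hn
            simp [hm0, hnh, pvBGo_cons_none hm0]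
          · have hstep : pvAStep (d, some r, some f) l =
                (d.modify r PySem.Dict.empty
                  (fun inner => inner.insert f (PySem.Str.strip l)), some r, none) := by
              simp only [pvAStep]; rw [if_neg h1, if_neg h2, if_pos htr, if_neg hn]; rfl
            rw [hstep,
              (ih (d.modify r PySem.Dict.empty
                (fun inner => inner.insert f (PySem.Str.strip l))) (some r) none).1
                (by simp [pvTruthyOptStr])]
            have hnh : pvNoHit (PySem.Str.strip l) = false := Bool.eq_false_iff.mpr hn
            simp [hm0, hnh, pvBGo_cons_none hm0]

-- ===== VERDICT (by name: the statement is the Claim_ definition above) =====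
theorem parse_gdb_symbols_spec : Claim_equal_parse_gdb_symbols := by
  intro section_ _
  unfold Spec_parse_gdb_symbols parse_gdb_symbols parse_gdb_symbols_alt
  match section_ with
  | none => rfl
  | some s =>
    have h := (pvA_eq_pvB (PySem.Str.splitlines s) PySem.Dict.empty none none).1 (by simp [pvTruthyOptStr])
    dsimp only
    rw [h]
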